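-- pv_equiv track=rewrite | github.com/gymoon10/Coding-Test | 4.이진탐색/6.도약.py | Solve_N2_2
-- ===== SOURCE A (Python) =====
-- import bisect
--
-- def Solve_N2_2(N, pos):
--     pos.sort()
--     cnt = 0
--     for s1 in range(N - 2):  # 첫 번째 연잎의 위치
--         for s2 in range(s1 + 1, N - 1):  # 두 번째 연잎의 선택 loop
--             jump = pos[s2] - pos[s1]
--             # rs ~ re가 가능한 범위
--             rs = pos[s2] + jump  # 이전에 뛴 거리 이상 뜀
--             re = pos[s2] + (2 * jump)  # 단 2배보다 멀리 뛰진 못함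
--
--             lower = bisect.bisect_left(pos, rs)  # 가능한 범위의 lower bound 인덱스 (rs이상인 것 중 최솟값)
--             if lower == N or pos[lower] > re:
--                 continue
--             upper = bisect.bisect_right(pos, re)  # 가능한 범위에 대한 upper bound 인덱스 (re이하인 것 중 최댓값)
--
--             cnt += upper - lower  # upper와 lower 사이의 개수를 카운트
--     return cnt
-- ===== SOURCE B (Python) =====
-- def Solve_N2_2(N, pos):
--     pos.sort()
--     n = len(pos)
--     cnt = 0
--     for s2 in range(1, N - 1):  # middle lily pad
--         lo = 0  # first index with pos[lo] >= rs
--         hi = 0  # first index with pos[hi] > re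
--         for s1 in range(s2 - 1, -1, -1):  # start pad; rs, re grow as s1 moves left
--             rs = 2 * pos[s2] - pos[s1]
--             re = 3 * pos[s2] - 2 * pos[s1]
--             while lo < n and pos[lo] < rs:
--                 lo += 1
--             while hi < n and pos[hi] <= re:
--                 hi += 1
--             cnt += hi - lo
--     return cnt
-- ===== Notes on version B (the rewrite author's own statement) =====
-- stated objective: alternative
-- what changed: Replaces the per-pair binary searches (bisect_left/bisect_right for every (s1,s2) pair) by, for each middle pad s2, a two-pointer sweep: s1 moves leftwards so the target window [rs,re] only grows and the two boundary pointers advance monotonically instead of being re-searched.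
-- outside the precondition, e.g. on Solve_N2_2(3, [0, 2, 3, 5, 8]): A returns 0, B returns 1; on Solve_N2_2(4, [0, 3, 4]): A raises IndexError, B returns 0
import Mathlib
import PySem

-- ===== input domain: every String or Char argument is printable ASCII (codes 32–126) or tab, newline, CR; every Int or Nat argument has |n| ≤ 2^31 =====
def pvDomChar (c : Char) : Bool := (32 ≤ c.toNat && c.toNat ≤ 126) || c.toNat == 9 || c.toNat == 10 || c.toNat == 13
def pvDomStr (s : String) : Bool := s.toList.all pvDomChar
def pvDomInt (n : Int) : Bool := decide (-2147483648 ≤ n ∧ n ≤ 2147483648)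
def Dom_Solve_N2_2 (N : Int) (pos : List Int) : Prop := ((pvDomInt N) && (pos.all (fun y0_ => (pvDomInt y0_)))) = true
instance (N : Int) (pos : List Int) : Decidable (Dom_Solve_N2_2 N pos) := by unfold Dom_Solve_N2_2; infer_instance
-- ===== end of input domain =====

-- B replaces A's per-pair binary searches by a monotone two-pointer sweep per middle pad;
-- equivalence is about the RETURN value only (the Python A and B both sort pos in place).

-- ===== PORT A =====
-- the body of A's inner loop: bisect_left/bisect_right are PySem.List.bisectLeft/bisectRight
-- (exact); pos[lower] is read with a default: inside Pre_ Python's short-circuit 'or' guarantees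
-- the index is in range whenever it is read.
def pvPairA (N : Int) (xs : List Int) (s1 s2 : Nat) (cnt : Int) : Int :=
  let jump := xs.getD s2 0 - xs.getD s1 0
  let rs := xs.getD s2 0 + jump
  let re := xs.getD s2 0 + 2 * jump
  let lower := PySem.List.bisectLeft xs rs
  if (lower : Int) = N ∨ xs.getD lower 0 > re then cnt
  else cnt + ((PySem.List.bisectRight xs re : Int) - (lower : Int))

-- literal port of A: sort, then for s1 in range(N-2): for s2 in range(s1+1, N-1): …
def Solve_N2_2 (N : Int) (pos : List Int) : Int :=
  let xs := PySem.List.sorted pos (fun x => x)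
  (List.range (N - 2).toNat).foldl (fun cnt s1 =>
    (List.range' (s1 + 1) ((N - 1).toNat - (s1 + 1))).foldl
      (fun cnt s2 => pvPairA N xs s1 s2 cnt) cnt) 0

-- ===== PORT B =====
-- 'while lo < n and pos[lo] < rs: lo += 1'  (the lo-pointer advance of Source B)
def pvAdvLt (xs : List Int) (rs : Int) (lo : Nat) : Nat :=
  if h : lo < xs.length then
    if xs[lo] < rs then pvAdvLt xs rs (lo + 1) else lo
  else lo
termination_by xs.length - lo

-- 'while hi < n and pos[hi] <= re: hi += 1'  (the hi-pointer advance of Source B)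
def pvAdvLe (xs : List Int) (re : Int) (hi : Nat) : Nat :=
  if h : hi < xs.length then
    if xs[hi] ≤ re then pvAdvLe xs re (hi + 1) else hi
  else hi
termination_by xs.length - hi

-- 'for s1 in range(s2 - 1, -1, -1): …' of Source B: processes s1 = k-1, k-2, …, 0
def pvInnerB (xs : List Int) (s2 : Nat) : Nat → Int → Nat → Nat → Int
  | 0, cnt, _, _ => cnt
  | k + 1, cnt, lo, hi =>
      let s1 := k
      let rs := 2 * xs.getD s2 0 - xs.getD s1 0
      let re := 3 * xs.getD s2 0 - 2 * xs.getD s1 0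
      let lo' := pvAdvLt xs rs lo
      let hi' := pvAdvLe xs re hi
      pvInnerB xs s2 k (cnt + ((hi' : Int) - (lo' : Int))) lo' hi'

-- literal port of Source B: sort, then for s2 in range(1, N-1) a two-pointer sweep over s1
def Solve_N2_2_alt (N : Int) (pos : List Int) : Int :=
  let xs := PySem.List.sorted pos (fun x => x)
  (List.range' 1 ((N - 1).toNat - 1)).foldl (fun cnt s2 => pvInnerB xs s2 s2 cnt 0 0) 0

-- ===== PRECONDITION & SPEC =====
-- Pre_ restricts to the natural domain N = len(pos) (plus the trivially-empty N ≤ 2): when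
-- N ≠ len(pos) and N ≥ 3, A's bisect scans the whole list while its guard compares the found
-- index against N, so A raises IndexError or accidentally skips pairs.
def Pre_Solve_N2_2 (N : Int) (pos : List Int) : Prop := N = (pos.length : Int) ∨ N ≤ 2
instance (N : Int) (pos : List Int) : Decidable (Pre_Solve_N2_2 N pos) := by
  unfold Pre_Solve_N2_2; infer_instance

def pvWitness_Solve_N2_2 : Int × List Int := (4, [1, 2, 4, 8])

def Spec_Solve_N2_2 (N : Int) (pos : List Int) (out : Int) : Prop := out = Solve_N2_2_alt N pos
instance (N : Int) (pos : List Int) (out : Int) : Decidable (Spec_Solve_N2_2 N pos out) := by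
  unfold Spec_Solve_N2_2; infer_instance

-- ===== CLAIM (what is proved, stated in full; the proofs are below) =====
def Claim_equal_Solve_N2_2 : Prop := ∀ (N : Int) (pos : List Int), Dom_Solve_N2_2 N pos → Pre_Solve_N2_2 N pos → Spec_Solve_N2_2 N pos (Solve_N2_2 N pos)

-- ===== LEMMAS AND PROOFS =====

-- the lower/upper window bounds for the pair (s1, s2) over the sorted list xs
def pvRs (xs : List Int) (s1 s2 : Nat) : Int := 2 * xs.getD s2 0 - xs.getD s1 0
def pvRe (xs : List Int) (s1 s2 : Nat) : Int := 3 * xs.getD s2 0 - 2 * xs.getD s1 0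
-- the contribution of the pair (s1, s2): #elements of xs inside [rs, re]
def pvG (xs : List Int) (s1 s2 : Nat) : Int :=
  (PySem.List.bisectRight xs (pvRe xs s1 s2) : Int) - (PySem.List.bisectLeft xs (pvRs xs s1 s2) : Int)
-- row/column sums of pvG
def pvS1 (xs : List Int) (n s1 : Nat) : Int := ∑ s2 ∈ Finset.Ico (s1 + 1) (n - 1), pvG xs s1 s2
def pvS2 (xs : List Int) (s2 : Nat) : Int := ∑ j ∈ Finset.range s2, pvG xs j s2

theorem pv_bl_mono (xs : List Int) (hs : xs.Pairwise (· ≤ ·)) {a b : Int} (hab : a ≤ b) :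
    PySem.List.bisectLeft xs a ≤ PySem.List.bisectLeft xs b := by
  obtain ⟨hla, hlta, hgea⟩ := PySem.List.bisectLeft_spec xs a hs
  obtain ⟨hlb, hltb, hgeb⟩ := PySem.List.bisectLeft_spec xs b hs
  by_contra hc
  have hj : PySem.List.bisectLeft xs b < xs.length :=
    lt_of_lt_of_le (Nat.lt_of_not_le hc) hla
  have h1 := hlta _ hj (Nat.lt_of_not_le hc)
  have h2 := hgeb _ hj le_rfl
  omega

theorem pv_br_mono (xs : List Int) (hs : xs.Pairwise (· ≤ ·)) {a b : Int} (hab : a ≤ b) :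
    PySem.List.bisectRight xs a ≤ PySem.List.bisectRight xs b := by
  obtain ⟨hla, hlta, hgea⟩ := PySem.List.bisectRight_spec xs a hs
  obtain ⟨hlb, hltb, hgeb⟩ := PySem.List.bisectRight_spec xs b hs
  by_contra hc
  have hj : PySem.List.bisectRight xs b < xs.length :=
    lt_of_lt_of_le (Nat.lt_of_not_le hc) hla
  have h1 := hlta _ hj (Nat.lt_of_not_le hc)
  have h2 := hgeb _ hj le_rfl
  omega

theorem pv_getD_mono (xs : List Int) (hs : xs.Pairwise (· ≤ ·)) {j k : Nat} (hjk : j ≤ k)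
    (hk : k < xs.length) : xs.getD j 0 ≤ xs.getD k 0 := by
  rcases Nat.eq_or_lt_of_le hjk with rfl | hjk'
  · exact le_refl _
  · have hj : j < xs.length := lt_trans hjk' hk
    rw [List.getD_eq_getElem xs 0 hj, List.getD_eq_getElem xs 0 hk]
    exact List.pairwise_iff_getElem.mp hs j k hj hk hjk'

-- the lo-advance lands exactly on bisect_left (sorted list, pointer not past the target)
theorem pv_advLt_eq (xs : List Int) (hs : xs.Pairwise (· ≤ ·)) (a : Int) (lo : Nat)
    (h : lo ≤ PySem.List.bisectLeft xs a) : pvAdvLt xs a lo = PySem.List.bisectLeft xs a := by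
  obtain ⟨hlen, hlt, hge⟩ := PySem.List.bisectLeft_spec xs a hs
  fun_induction pvAdvLt xs a lo with
  | case1 lo hlo hx ih =>
      apply ih
      rcases Nat.lt_or_ge lo (PySem.List.bisectLeft xs a) with hl | hl
      · omega
      · have := hge lo hlo hl; omega
  | case2 lo hlo hx =>
      rcases Nat.lt_or_ge lo (PySem.List.bisectLeft xs a) with hl | hl
      · have := hlt lo hlo hl; omega
      · omega
  | case3 lo hlo => omega

-- the hi-advance lands exactly on bisect_right
theorem pv_advLe_eq (xs : List Int) (hs : xs.Pairwise (· ≤ ·)) (a : Int) (hi : Nat)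
    (h : hi ≤ PySem.List.bisectRight xs a) : pvAdvLe xs a hi = PySem.List.bisectRight xs a := by
  obtain ⟨hlen, hlt, hge⟩ := PySem.List.bisectRight_spec xs a hs
  fun_induction pvAdvLe xs a hi with
  | case1 hi hhi hx ih =>
      apply ih
      rcases Nat.lt_or_ge hi (PySem.List.bisectRight xs a) with hl | hl
      · omega
      · have := hge hi hhi hl; omega
  | case2 hi hhi hx =>
      rcases Nat.lt_or_ge hi (PySem.List.bisectRight xs a) with hl | hl
      · have := hlt hi hhi hl; omega
      · omega
  | case3 hi hhi => omega

-- A's 'continue' guard fires only when the window [rs, re] is empty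
theorem pv_skip_eq (xs : List Int) (hs : xs.Pairwise (· ≤ ·)) {rs re : Int} (hle : rs ≤ re)
    (hskip : PySem.List.bisectLeft xs rs = xs.length ∨
      (PySem.List.bisectLeft xs rs < xs.length ∧ xs.getD (PySem.List.bisectLeft xs rs) 0 > re)) :
    PySem.List.bisectRight xs re = PySem.List.bisectLeft xs rs := by
  obtain ⟨hlL, hltL, hgeL⟩ := PySem.List.bisectLeft_spec xs rs hs
  obtain ⟨hlR, hltR, hgeR⟩ := PySem.List.bisectRight_spec xs re hs
  rcases hskip with hskip | ⟨hlt, hgt⟩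
  · rw [hskip]
    by_contra hc
    have hj : PySem.List.bisectRight xs re < xs.length := lt_of_le_of_ne hlR hc
    have h2 := hgeR _ hj le_rfl
    have h1 := hltL _ hj (by omega)
    omega
  · rw [List.getD_eq_getElem xs 0 hlt] at hgt
    have hle1 : PySem.List.bisectRight xs re ≤ PySem.List.bisectLeft xs rs := by
      by_contra hc
      have := hltR _ hlt (by omega)
      omega
    have hge1 : PySem.List.bisectLeft xs rs ≤ PySem.List.bisectRight xs re := by
      by_contra hc
      have hj : PySem.List.bisectRight xs re < xs.length := by omega
      have h1 := hltL _ hj (by omega)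
      have h2 := hgeR _ hj le_rfl
      omega
    omega

-- A's inner-loop body is exactly the window count pvG (with N = len)
theorem pv_perpair (xs : List Int) (hs : xs.Pairwise (· ≤ ·)) (N : Int)
    (hN : N = (xs.length : Int)) (s1 s2 : Nat) (h12 : s1 < s2) (h2 : s2 < xs.length) (cnt : Int) :
    pvPairA N xs s1 s2 cnt = cnt + pvG xs s1 s2 := by
  have hmono := pv_getD_mono xs hs (le_of_lt h12) h2
  have hrs : xs.getD s2 0 + (xs.getD s2 0 - xs.getD s1 0) = pvRs xs s1 s2 := by
    unfold pvRs; ring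
  have hre : xs.getD s2 0 + 2 * (xs.getD s2 0 - xs.getD s1 0) = pvRe xs s1 s2 := by
    unfold pvRe; ring
  have hrsre : pvRs xs s1 s2 ≤ pvRe xs s1 s2 := by unfold pvRs pvRe; omega
  simp only [pvPairA, hrs, hre]
  split_ifs with hc
  · have hskip : PySem.List.bisectLeft xs (pvRs xs s1 s2) = xs.length ∨
        (PySem.List.bisectLeft xs (pvRs xs s1 s2) < xs.length ∧
          xs.getD (PySem.List.bisectLeft xs (pvRs xs s1 s2)) 0 > pvRe xs s1 s2) := by
      rcases hc with hc | hc
      · left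
        have hcast : ((PySem.List.bisectLeft xs (pvRs xs s1 s2) : Nat) : Int) = (xs.length : Int) := by
          rw [hc, hN]
        exact_mod_cast hcast
      · by_cases hL : PySem.List.bisectLeft xs (pvRs xs s1 s2) = xs.length
        · exact Or.inl hL
        · exact Or.inr ⟨lt_of_le_of_ne (PySem.List.bisectLeft_spec xs _ hs).1 hL, hc⟩
    have := pv_skip_eq xs hs hrsre hskip
    unfold pvG
    omega
  · unfold pvG
    ring

-- A's inner loop, folded into a row sum
theorem pv_foldA (xs : List Int) (hs : xs.Pairwise (· ≤ ·)) (N : Int)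
    (hN : N = (xs.length : Int)) (s1 : Nat) :
    ∀ (m start : Nat), s1 < start → start + m ≤ xs.length → ∀ (cnt : Int),
      (List.range' start m).foldl (fun cnt s2 => pvPairA N xs s1 s2 cnt) cnt
        = cnt + ∑ s2 ∈ Finset.Ico start (start + m), pvG xs s1 s2 := by
  intro m
  induction m with
  | zero => intro start _ _ cnt; simp
  | succ m ih =>
      intro start hlt hle cnt
      rw [List.range'_succ, List.foldl_cons]
      rw [pv_perpair xs hs N hN s1 start hlt (by omega)]
      rw [ih (start + 1) (by omega) (by omega)]
      have hb : start + 1 + m = start + (m + 1) := by omega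
      rw [hb]
      conv_rhs => rw [Finset.sum_eq_sum_Ico_succ_bot
        (show start < start + (m + 1) by omega) (pvG xs s1)]
      ring

-- B's inner loop equals the accumulated pair contributions (two-pointer invariant)
theorem pv_innerB_eq (xs : List Int) (hs : xs.Pairwise (· ≤ ·)) (s2 : Nat) (hn : s2 < xs.length) :
    ∀ (k : Nat), k ≤ s2 → ∀ (cnt : Int) (lo hi : Nat),
      (∀ j, j < k → lo ≤ PySem.List.bisectLeft xs (pvRs xs j s2) ∧
        hi ≤ PySem.List.bisectRight xs (pvRe xs j s2)) →
      pvInnerB xs s2 k cnt lo hi = cnt + ∑ j ∈ Finset.range k, pvG xs j s2 := by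
  intro k
  induction k with
  | zero => intro _ cnt lo hi _; simp [pvInnerB]
  | succ k ih =>
      intro hk cnt lo hi hinv
      have hkl : k < xs.length := lt_trans (Nat.lt_of_lt_of_le (Nat.lt_succ_self k) hk) hn
      have hklt : k < k + 1 := Nat.lt_succ_self k
      have hlo' : pvAdvLt xs (2 * xs.getD s2 0 - xs.getD k 0) lo
          = PySem.List.bisectLeft xs (pvRs xs k s2) :=
        pv_advLt_eq xs hs _ lo (hinv k hklt).1
      have hhi' : pvAdvLe xs (3 * xs.getD s2 0 - 2 * xs.getD k 0) hi
          = PySem.List.bisectRight xs (pvRe xs k s2) :=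
        pv_advLe_eq xs hs _ hi (hinv k hklt).2
      show pvInnerB xs s2 k _ _ _ = _
      rw [hlo', hhi']
      rw [ih (le_of_lt (Nat.lt_of_lt_of_le (Nat.lt_succ_self k) hk))
        _ _ _ (fun j hj => ?_)]
      · rw [Finset.sum_range_succ]
        show cnt + ((PySem.List.bisectRight xs (pvRe xs k s2) : Int)
            - (PySem.List.bisectLeft xs (pvRs xs k s2) : Int)) + _ = _
        unfold pvG
        ring
      · have hjk : j ≤ k := le_of_lt hj
        constructor
        · exact pv_bl_mono xs hs (by
            unfold pvRs
            have := pv_getD_mono xs hs hjk hkl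
            omega)
        · exact pv_br_mono xs hs (by
            unfold pvRe
            have := pv_getD_mono xs hs hjk hkl
            omega)

-- B's inner sweep, folded into a column sum
theorem pv_foldB_cell (xs : List Int) (hs : xs.Pairwise (· ≤ ·)) (s2 : Nat)
    (hn : s2 < xs.length) (cnt : Int) :
    pvInnerB xs s2 s2 cnt 0 0 = cnt + pvS2 xs s2 := by
  exact pv_innerB_eq xs hs s2 hn s2 le_rfl cnt 0 0 (fun j _ => ⟨Nat.zero_le _, Nat.zero_le _⟩)

-- summation-order exchange: columns (B) versus rows (A) of the triangle s1 < s2 ≤ m - 1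
theorem pv_exchange (f : Nat → Nat → Int) :
    ∀ (m : Nat), ∑ s2 ∈ Finset.Ico 1 m, ∑ s1 ∈ Finset.range s2, f s1 s2
      = ∑ s1 ∈ Finset.range (m - 1), ∑ s2 ∈ Finset.Ico (s1 + 1) m, f s1 s2 := by
  intro m
  induction m with
  | zero => simp
  | succ m ih =>
      rcases Nat.eq_zero_or_pos m with rfl | hm
      · simp
      · rw [Finset.sum_Ico_succ_top (by omega), ih]
        have hms : m + 1 - 1 = (m - 1) + 1 := by omega
        rw [hms, Finset.sum_range_succ]
        have htop : ∀ s1 ∈ Finset.range (m - 1),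
            ∑ s2 ∈ Finset.Ico (s1 + 1) (m + 1), f s1 s2
              = (∑ s2 ∈ Finset.Ico (s1 + 1) m, f s1 s2) + f s1 m := by
          intro s1 hs1
          rw [Finset.mem_range] at hs1
          exact Finset.sum_Ico_succ_top (by omega) _
        rw [Finset.sum_congr rfl htop, Finset.sum_add_distrib]
        have hempty : ∑ s2 ∈ Finset.Ico (m - 1 + 1) (m + 1), f (m - 1) s2
            = f (m - 1) m := by
          have h1 : m - 1 + 1 = m := by omega
          rw [h1, Finset.sum_Ico_succ_top (le_refl m), Finset.Ico_self,
            Finset.sum_empty, zero_add]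
        rw [hempty]
        have hrange : ∑ s1 ∈ Finset.range m, f s1 m
            = (∑ s1 ∈ Finset.range (m - 1), f s1 m) + f (m - 1) m := by
          have h1 : m = (m - 1) + 1 := by omega
          rw [h1, Finset.sum_range_succ]
          rw [← h1]
        rw [hrange]
        ring

theorem pv_sum_range' (m : Nat) (f : Nat → Int) :
    ((List.range' 1 m).map f).sum = ∑ i ∈ Finset.Ico 1 (1 + m), f i := by
  rw [List.range'_eq_map_range, List.map_map, Finset.sum_Ico_eq_sum_range,
    Nat.add_sub_cancel_left]
  rfl

-- ===== VERDICT (by name: the statement is the Claim_ definition above) =====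
theorem Solve_N2_2_spec : Claim_equal_Solve_N2_2 := by
  intro N pos _ hpre
  unfold Spec_Solve_N2_2
  simp only [Solve_N2_2, Solve_N2_2_alt]
  rcases hpre with hN | hN2
  · -- main case: N = len(pos)
    have hs : (PySem.List.sorted pos (fun x : Int => x)).Pairwise (· ≤ ·) := by
      simpa using PySem.List.sorted_pairwise pos (fun x : Int => x)
    set xs := PySem.List.sorted pos (fun x : Int => x) with hxs
    have hlen : xs.length = pos.length := PySem.List.length_sorted pos (fun x : Int => x) false
    set n := pos.length with hn
    have hN' : N = (xs.length : Int) := by rw [hlen]; exact hN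
    have h2 : (N - 2).toNat = n - 2 := by omega
    have h1 : (N - 1).toNat = n - 1 := by omega
    rw [h2, h1]
    -- A's double loop is the row-wise sum
    have hA : (List.range (n - 2)).foldl (fun cnt s1 =>
        (List.range' (s1 + 1) (n - 1 - (s1 + 1))).foldl
          (fun cnt s2 => pvPairA N xs s1 s2 cnt) cnt) 0
        = ∑ s1 ∈ Finset.range (n - 2), pvS1 xs n s1 := by
      rw [PySem.List.foldl_congr_mem _ _ (fun acc s1 => acc + pvS1 xs n s1) 0 ?_]
      · rw [PySem.List.foldl_add, zero_add]
        rfl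
      · intro acc s1 hm
        rw [List.mem_range] at hm
        rw [pv_foldA xs hs N hN' s1 (n - 1 - (s1 + 1)) (s1 + 1)
          (Nat.lt_succ_self s1) (by omega) acc]
        unfold pvS1
        have hb : s1 + 1 + (n - 1 - (s1 + 1)) = n - 1 := by omega
        rw [hb]
    -- B's sweep is the column-wise sum
    have hB : (List.range' 1 (n - 1 - 1)).foldl (fun cnt s2 => pvInnerB xs s2 s2 cnt 0 0) 0
        = ∑ s2 ∈ Finset.Ico 1 (1 + (n - 1 - 1)), pvS2 xs s2 := by
      rw [PySem.List.foldl_congr_mem _ _ (fun acc s2 => acc + pvS2 xs s2) 0 ?_]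
      · rw [PySem.List.foldl_add, zero_add, pv_sum_range']
      · intro acc s2 hm
        rw [List.mem_range'_1] at hm
        exact pv_foldB_cell xs hs s2 (by omega) acc
    rw [hA, hB]
    rcases Nat.lt_or_ge n 2 with hsm | hge
    · have e1 : n - 2 = 0 := by omega
      have e2 : n - 1 - 1 = 0 := by omega
      rw [e1, e2]
      simp
    · have e1 : 1 + (n - 1 - 1) = n - 1 := by omega
      rw [e1]
      unfold pvS1 pvS2
      rw [pv_exchange (pvG xs) (n - 1)]
      have e2 : n - 1 - 1 = n - 2 := by omega
      rw [e2]
  · -- degenerate case N ≤ 2: both loops are empty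
    have h2 : (N - 2).toNat = 0 := by omega
    have h1 : (N - 1).toNat - 1 = 0 := by omega
    rw [h2, h1]
    simp
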